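-- pv_equiv track=rewrite | github.com/Norden-Tenzin/pychess | src/board_maker.py | board_empty
-- ===== SOURCE A (Python) =====
-- alphabetsoup = list(map(chr, range(97, 105)))
--
-- def board_empty(play_as):
--     oneList =[]
--     oneBoard = []
--     if play_as == 0:
--         for x in range(8, 0, -1):
--             for i, y in enumerate(alphabetsoup):
--                 oneList.append((y + str(x) + "-##"))
--             oneBoard.append(oneList)
--             oneList = []
--     if play_as == 1:
--         for x in range(1, 9, 1):
--             for i, y in enumerate(alphabetsoup[::-1]):
--                 oneList.append((y + str(x) + "-##"))
--             oneBoard.append(oneList)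
--             oneList = []
--     return oneBoard
-- ===== SOURCE B (Python) =====
-- def board_empty(play_as):
--     rows = [[chr(97 + c) + str(8 - r) + "-##" for c in range(8)] for r in range(8)]
--     if play_as == 0:
--         return rows
--     if play_as == 1:
--         return [row[::-1] for row in reversed(rows)]
--     return []
-- ===== Notes on version B (the rewrite author's own statement) =====
-- stated objective: simpler
-- what changed: B builds the play_as==0 board once as a nested comprehension and derives the play_as==1 board as its 180-degree rotation (reverse rows and each row), replacing A's two independent accumulator double loops.
import Mathlib
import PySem

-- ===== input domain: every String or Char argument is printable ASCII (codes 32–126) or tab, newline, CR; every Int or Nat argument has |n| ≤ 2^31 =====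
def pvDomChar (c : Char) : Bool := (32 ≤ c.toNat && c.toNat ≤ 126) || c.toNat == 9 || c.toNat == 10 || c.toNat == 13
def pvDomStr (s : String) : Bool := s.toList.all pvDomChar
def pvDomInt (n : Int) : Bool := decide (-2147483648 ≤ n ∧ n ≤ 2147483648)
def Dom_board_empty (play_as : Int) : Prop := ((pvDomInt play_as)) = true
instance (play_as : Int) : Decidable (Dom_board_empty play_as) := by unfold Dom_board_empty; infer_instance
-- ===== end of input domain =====

-- B builds the base board once and derives the flipped orientation by a 180-degree rotation; objective: simpler.
-- ===== PORT A =====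
def alphabetsoupA : List String := (PySem.List.pyRange 97 105 1).map (fun n => String.ofList [Char.ofNat n.toNat])

def board_empty (play_as : Int) : List (List String) :=
  let oneBoard : List (List String) := []
  let oneBoard :=
    if play_as = 0 then
      (PySem.List.pyRange 8 0 (-1)).foldl (fun bd x =>
        bd ++ [(PySem.List.enumerate alphabetsoupA).foldl
          (fun lst p => lst ++ [p.2 ++ PySem.Int.toStr x ++ "-##"]) []]) oneBoard
    else oneBoard
  let oneBoard :=
    if play_as = 1 then
      (PySem.List.pyRange 1 9 1).foldl (fun bd x =>
        bd ++ [(PySem.List.enumerate ((PySem.List.slice? alphabetsoupA none none (-1)).getD [])).foldl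
          (fun lst p => lst ++ [p.2 ++ PySem.Int.toStr x ++ "-##"]) []]) oneBoard
    else oneBoard
  oneBoard

-- ===== PORT B =====
def board_empty_alt (play_as : Int) : List (List String) :=
  let rows := (List.range 8).map (fun r =>
    (List.range 8).map (fun c =>
      String.ofList [Char.ofNat (97 + c)] ++ PySem.Int.toStr (8 - (r : Int)) ++ "-##"))
  if play_as = 0 then rows
  else if play_as = 1 then rows.reverse.map List.reverse
  else []

-- ===== PRECONDITION & SPEC =====
def Spec_board_empty (play_as : Int) (out : List (List String)) : Prop := out = board_empty_alt play_as
instance (play_as : Int) (out : List (List String)) : Decidable (Spec_board_empty play_as out) := by unfold Spec_board_empty; infer_instance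

-- ===== CLAIM (what is proved, stated in full; the proofs are below) =====
def Claim_equal_board_empty : Prop := ∀ (play_as : Int), Dom_board_empty play_as → Spec_board_empty play_as (board_empty play_as)

-- ===== LEMMAS AND PROOFS =====
theorem eq_at_zero : board_empty 0 = board_empty_alt 0 := by decide

theorem eq_at_one : board_empty 1 = board_empty_alt 1 := by decide

-- ===== VERDICT (by name: the statement is the Claim_ definition above) =====
theorem board_empty_spec : Claim_equal_board_empty := by
  intro p _
  unfold Spec_board_empty
  by_cases h0 : p = 0
  · subst h0; exact eq_at_zero
  · by_cases h1 : p = 1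
    · subst h1; exact eq_at_one
    · simp [board_empty, board_empty_alt, h0, h1]
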